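-- pv_equiv track=rewrite | github.com/nermadie/CodeForces_Solutions | CodeforcesRound950Div3/prob01.py | solve
-- ===== SOURCE A (Python) =====
-- def solve(n, m, a):
--     prob_diff_dict = {}
--     for i in range(n):
--         prob_diff_dict.setdefault(a[i], 0)
--         prob_diff_dict[a[i]] += 1
--     result = 0
--     for prob_diff, count in prob_diff_dict.items():
--         if count < m:
--             result += m - count
--     result += (7 - len(prob_diff_dict)) * m
--     return result
-- ===== SOURCE B (Python) =====
-- def solve(n, m, a):
--     xs = sorted(a[:max(n, 0)])
--     covered = 0
--     i = 0
--     while i < len(xs):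
--         run = 1
--         while i + run < len(xs) and xs[i + run] == xs[i]:
--             run += 1
--         covered += min(run, m)
--         i += run
--     return 7 * m - covered
-- ===== Notes on version B (the rewrite author's own statement) =====
-- stated objective: alternative
-- what changed: B uses no dictionary at all: it sorts the prefix, scans equal-value runs with two pointers, accumulates min(run_length, m) per run, and returns 7*m minus that; A builds a frequency map and sums per-level deficits plus an absent-levels term.
import Mathlib
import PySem

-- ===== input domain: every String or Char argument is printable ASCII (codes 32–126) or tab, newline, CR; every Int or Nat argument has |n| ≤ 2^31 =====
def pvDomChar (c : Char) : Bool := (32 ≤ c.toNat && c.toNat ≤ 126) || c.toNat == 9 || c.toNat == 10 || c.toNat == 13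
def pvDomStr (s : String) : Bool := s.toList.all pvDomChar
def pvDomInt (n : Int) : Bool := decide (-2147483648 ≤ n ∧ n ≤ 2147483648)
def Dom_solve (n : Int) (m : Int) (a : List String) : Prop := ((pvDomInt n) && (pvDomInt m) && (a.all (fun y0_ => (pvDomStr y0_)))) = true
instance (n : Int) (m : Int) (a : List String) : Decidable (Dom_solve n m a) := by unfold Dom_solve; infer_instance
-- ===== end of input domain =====

-- B drops the frequency dictionary entirely: it sorts the prefix, scans equal-value runs with
-- two pointers accumulating min(run, m), and returns 7*m minus that (return value only).

-- ===== PORT A =====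
-- a[i] is ported as pyGetD with default ""; Pre_solve (n ≤ len a) excludes exactly the
-- inputs where Python's a[i] would raise IndexError.
def solve (n : Int) (m : Int) (a : List String) : Int :=
  let d : PySem.Dict String Int :=
    (PySem.List.pyRange 0 n 1).foldl
      (fun d i =>
        let key := PySem.List.pyGetD a i ""
        (d.setdefault key 0).modify key 0 (· + 1))
      PySem.Dict.empty
  let result : Int :=
    d.items.foldl (fun r p => if p.2 < m then r + (m - p.2) else r) 0
  result + (7 - (d.size : Int)) * m

-- ===== PORT B =====
-- the outer while loop over the sorted list: one recursive step per run of equal values;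
-- the inner while loop counting the run is the takeWhile prefix, advancing i is dropWhile.
def runScan (m : Int) : List String → Int
  | [] => 0
  | x :: rest =>
    min ((1 + (rest.takeWhile (fun y => y == x)).length : Nat) : Int) m
      + runScan m (rest.dropWhile (fun y => y == x))
termination_by ys => ys.length
decreasing_by
  simp only [List.length_cons]
  exact Nat.lt_succ_of_le (List.Sublist.length_le (List.dropWhile_sublist _))

def solve_alt (n : Int) (m : Int) (a : List String) : Int :=
  let xs := PySem.List.sorted (PySem.List.slice a none (some (max n 0))) (fun s => s) false
  7 * m - runScan m xs

-- ===== PRECONDITION & SPEC =====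
-- Pre_solve: exactly the inputs on which A returns (a[i] raises IndexError iff n > len(a)).
def Pre_solve (n : Int) (m : Int) (a : List String) : Prop := n ≤ (a.length : Int)
instance (n : Int) (m : Int) (a : List String) : Decidable (Pre_solve n m a) := by unfold Pre_solve; infer_instance
def pvWitness_solve : Int × Int × List String := (3, 2, ["1", "2", "1"])

def Spec_solve (n : Int) (m : Int) (a : List String) (out : Int) : Prop := out = solve_alt n m a
instance (n : Int) (m : Int) (a : List String) (out : Int) : Decidable (Spec_solve n m a out) := by unfold Spec_solve; infer_instance

-- ===== CLAIM (what is proved, stated in full; the proofs are below) =====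
def Claim_equal_solve : Prop := ∀ (n : Int) (m : Int) (a : List String), Dom_solve n m a → Pre_solve n m a → Spec_solve n m a (solve n m a)

-- ===== LEMMAS AND PROOFS =====

-- A's loop body (setdefault then modify) is the counter step (insert of getD+1).
theorem step_eq (d : PySem.Dict String Int) (x : String) :
    (d.setdefault x 0).modify x 0 (· + 1) = d.insert x (d.getD x 0 + 1) := by
  by_cases h : d.contains x = true
  · rw [PySem.Dict.setdefault_of_contains (h := h)]
    simp [PySem.Dict.modify]
  · rw [PySem.Dict.setdefault_of_not_contains (h := by simpa using h)]
    simp [PySem.Dict.modify, PySem.Dict.getD_insert_self, PySem.Dict.insert_insert_self,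
      PySem.Dict.getD_of_not_contains (h := by simpa using h)]

-- Indexed loop over range(n) equals the fold over take n.
theorem fold_take {β : Type} (a : List String) (step : β → String → β) (init : β)
    (k : Nat) (hk : k ≤ a.length) :
    (PySem.List.pyRange 0 (k : Int) 1).foldl
      (fun d i => step d (PySem.List.pyGetD a i "")) init
    = (a.take k).foldl step init := by
  induction k with
  | zero => simp [PySem.List.pyRange_one_eq_nil]
  | succ j ih =>
    have hj : j < a.length := by omega
    rw [show ((j + 1 : Nat) : Int) = (j : Int) + 1 by push_cast; ring]
    rw [PySem.List.pyRange_one_succ_right (by positivity)]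
    rw [List.foldl_append, ih (by omega)]
    rw [List.take_add_one, List.foldl_append]
    simp [List.getElem?_eq_getElem hj, PySem.List.pyGetD_ofNat (h := hj)]

-- A's deficit loop, as a function of the key list and its count function.
theorem sum_deficit (m : Int) (f : String → Int) (ks : List String) (r : Int) :
    ks.foldl (fun r k => if f k < m then r + (m - f k) else r) r
      = r + (ks.length : Int) * m - (ks.map (fun k => min (f k) m)).sum := by
  induction ks generalizing r with
  | nil => simp
  | cons k ks ih =>
    simp only [List.foldl_cons, List.length_cons, List.map_cons, List.sum_cons]
    rw [ih]
    have : (if f k < m then r + (m - f k) else r) = r + (m - min (f k) m) := by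
      split_ifs with h <;> omega
    rw [this]
    push_cast
    ring

-- In a sorted tail whose elements all dominate x, no x survives dropWhile (== x).
theorem not_mem_dropWhile_sorted (x : String) (rest : List String)
    (h : rest.Pairwise (· ≤ ·)) (hx : ∀ y ∈ rest, x ≤ y) :
    x ∉ rest.dropWhile (fun y => y == x) := by
  induction rest with
  | nil => simp
  | cons y ys ih =>
    rcases List.pairwise_cons.mp h with ⟨hy, hys⟩
    by_cases he : (y == x) = true
    · rw [List.dropWhile_cons, if_pos he]
      exact ih hys (fun z hz => hx z (List.mem_cons_of_mem _ hz))
    · rw [List.dropWhile_cons, if_neg he]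
      intro hmem
      rcases List.mem_cons.mp hmem with rfl | hmem
      · exact he (beq_self_eq_true _)
      · have h1 : y ≤ x := hy x hmem
        have h2 : x ≤ y := hx y (List.mem_cons_self)
        exact he (by simp [le_antisymm h1 h2])

-- The run scan on a sorted list is the sum of min(count, m) over its distinct values.
theorem runScan_sorted_aux (m : Int) :
    ∀ (k : Nat) (ys : List String), ys.length ≤ k → ys.Pairwise (· ≤ ·) →
      runScan m ys = ((PySem.Set.ofList ys).map (fun v => min ((ys.count v : Nat) : Int) m)).sum := by
  intro k
  induction k with
  | zero =>
    intro ys hk _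
    have : ys = [] := List.eq_nil_of_length_eq_zero (by omega)
    subst this
    simp [runScan]
  | succ j ih =>
    intro ys hk hp
    cases ys with
    | nil => simp [runScan]
    | cons x rest =>
      rcases List.pairwise_cons.mp hp with ⟨hx, hrest⟩
      set tk := rest.takeWhile (fun y => y == x) with htk
      set dr := rest.dropWhile (fun y => y == x) with hdr
      have hsplit : tk ++ dr = rest := List.takeWhile_append_dropWhile
      have htkx : ∀ y ∈ tk, y = x := by
        intro y hy
        have := List.mem_takeWhile_imp hy
        simpa using this
      have hxdr : x ∉ dr := not_mem_dropWhile_sorted x rest hrest hx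
      have hdrp : dr.Pairwise (· ≤ ·) := List.Pairwise.sublist (List.dropWhile_sublist _) hrest
      have hlen : dr.length ≤ j := by
        have h1 : dr.length ≤ rest.length := by
          rw [hdr]; exact (List.dropWhile_sublist _).length_le
        simp only [List.length_cons] at hk
        omega
      -- counts
      have hcount_x : (x :: rest).count x = 1 + tk.length := by
        have h1 : tk.count x = tk.length :=
          List.count_eq_length.mpr (fun b hb => ((htkx b hb).symm ▸ rfl))
        have h2 : dr.count x = 0 := List.count_eq_zero.mpr hxdr
        rw [← hsplit]
        simp [List.count_append, h1, h2, Nat.add_comm]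
      have hcount_ne : ∀ v, v ≠ x → (x :: rest).count v = dr.count v := by
        intro v hv
        have h1 : tk.count v = 0 :=
          List.count_eq_zero.mpr (fun hmem => hv (htkx v hmem))
        rw [← hsplit]
        simp [List.count_append, h1, Ne.symm hv]
      -- distinct values: ofList (x :: rest) is a permutation of x :: ofList dr
      have hperm : (PySem.Set.ofList (x :: rest)).Perm (x :: PySem.Set.ofList dr) := by
        rw [List.perm_ext_iff_of_nodup (PySem.Set.nodup_ofList _)
          (List.nodup_cons.mpr ⟨fun hc => hxdr ((PySem.Set.mem_ofList _ _).mp hc), PySem.Set.nodup_ofList _⟩)]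
        intro v
        simp only [PySem.Set.mem_ofList, List.mem_cons]
        constructor
        · rintro (rfl | hv)
          · exact Or.inl rfl
          · rw [← hsplit] at hv
            rcases List.mem_append.mp hv with hv | hv
            · exact Or.inl (htkx v hv)
            · exact Or.inr hv
        · rintro (rfl | hv)
          · exact Or.inl rfl
          · exact Or.inr (hsplit ▸ List.mem_append_right tk hv)
      calc runScan m (x :: rest)
          = min ((1 + tk.length : Nat) : Int) m + runScan m dr := by
            rw [runScan]
        _ = min (((x :: rest).count x : Nat) : Int) m
              + ((PySem.Set.ofList dr).map (fun v => min ((dr.count v : Nat) : Int) m)).sum := by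
            rw [hcount_x, ih dr hlen hdrp]
        _ = ((x :: PySem.Set.ofList dr).map (fun v => min (((x :: rest).count v : Nat) : Int) m)).sum := by
            rw [List.map_cons, List.sum_cons]
            congr 1
            congr 1
            apply List.map_congr_left
            intro v hv
            have hvx : v ≠ x := fun h => hxdr (h ▸ (PySem.Set.mem_ofList _ _).mp hv)
            rw [hcount_ne v hvx]
        _ = ((PySem.Set.ofList (x :: rest)).map (fun v => min (((x :: rest).count v : Nat) : Int) m)).sum :=
            (List.Perm.sum_eq (hperm.map _)).symm

theorem runScan_sorted (m : Int) (ys : List String) (hp : ys.Pairwise (· ≤ ·)) :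
    runScan m ys = ((PySem.Set.ofList ys).map (fun v => min ((ys.count v : Nat) : Int) m)).sum :=
  runScan_sorted_aux m ys.length ys le_rfl hp

-- ===== VERDICT (by name: the statement is the Claim_ definition above) =====

theorem solve_spec : Claim_equal_solve := by
  intro n m a _ hpre
  unfold Spec_solve solve solve_alt
  set t := PySem.List.slice a none (some (max n 0)) with ht
  -- A's dict is the counter of t
  have hdict :
      (PySem.List.pyRange 0 n 1).foldl
        (fun d i =>
          let key := PySem.List.pyGetD a i ""
          (d.setdefault key 0).modify key 0 (· + 1))
        (PySem.Dict.empty : PySem.Dict String Int)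
      = PySem.Dict.counter t := by
    rw [← PySem.Dict.foldl_insert_getD_add_one_eq_counter]
    by_cases hn : 0 ≤ n
    · have hmax : max n 0 = n := by omega
      have hk : n.toNat ≤ a.length := by
        have := hpre; unfold Pre_solve at this; omega
      rw [ht, hmax, PySem.List.slice_to (hb := hn)]
      rw [show n = ((n.toNat : Nat) : Int) by omega]
      simp only [Int.toNat_natCast, step_eq]
      exact fold_take a (fun (d : PySem.Dict String Int) x => d.insert x (d.getD x 0 + 1))
        PySem.Dict.empty n.toNat hk
    · have hmax : max n 0 = (0 : Int) := by omega
      rw [PySem.List.pyRange_one_eq_nil (by omega)]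
      rw [ht, hmax, PySem.List.slice_to (hb := by omega)]
      simp
  simp only []
  rw [hdict]
  -- A's value: 7*m minus the sum of min(count, m) over distinct values of t
  have hitems : (PySem.Dict.counter t).items
      = (PySem.Set.ofList t).map (fun k => (k, ((t.count k : Nat) : Int))) :=
    PySem.Dict.items_counter t
  have hsize : ((PySem.Dict.counter t).size : Int) = ((PySem.Set.ofList t).length : Int) := by
    simp [PySem.Dict.size, hitems]
  have hfoldA : (PySem.Dict.counter t).items.foldl
      (fun r p => if p.2 < m then r + (m - p.2) else r) 0
      = ((PySem.Set.ofList t).length : Int) * m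
        - ((PySem.Set.ofList t).map (fun v => min ((t.count v : Nat) : Int) m)).sum := by
    rw [hitems, List.foldl_map]
    have h := sum_deficit m (fun k => ((t.count k : Nat) : Int)) (PySem.Set.ofList t) 0
    simpa using h
  rw [hfoldA, hsize]
  -- B's value: the run scan over sorted t is the same sum
  have hperm : (PySem.List.sorted t (fun s => s) false).Perm t := PySem.List.sorted_perm t _ _
  have hp : (PySem.List.sorted t (fun s => s) false).Pairwise (· ≤ ·) := by
    simpa using PySem.List.sorted_pairwise t (fun s => s)
  rw [runScan_sorted m _ hp]
  have hpermOf : (PySem.Set.ofList (PySem.List.sorted t (fun s => s) false)).Perm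
      (PySem.Set.ofList t) := by
    rw [List.perm_ext_iff_of_nodup (PySem.Set.nodup_ofList _) (PySem.Set.nodup_ofList _)]
    intro v
    rw [PySem.Set.mem_ofList, PySem.Set.mem_ofList, PySem.List.mem_sorted]
  have hcongr : (PySem.Set.ofList (PySem.List.sorted t (fun s => s) false)).map
        (fun v => min (((PySem.List.sorted t (fun s => s) false).count v : Nat) : Int) m)
      = (PySem.Set.ofList (PySem.List.sorted t (fun s => s) false)).map
        (fun v => min ((t.count v : Nat) : Int) m) := by
    apply List.map_congr_left
    intro v _
    rw [hperm.count_eq]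
  rw [hcongr, List.Perm.sum_eq (hpermOf.map _)]
  ring
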